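-- pv_equiv track=rewrite | github.com/MagicAlex238/3_combined | corrosion_scoring/scoring_system.py | assign_mechanism_from_pathway
-- ===== SOURCE A (Python) =====
-- def assign_mechanism_from_pathway(pathways):
--     """Map pathways to corrosion mechanisms based on pathway keywords"""
--     pathway_to_mechanism = {
--         'nitrogen': 'nitrogen_metabolism',
--         'nitrate': 'nitrogen_metabolism',
--         'nitrite': 'nitrogen_metabolism',
--         'denitrification': 'nitrogen_metabolism',
--         'nitrification': 'nitrogen_metabolism',
--         'manganese': 'manganese_metabolism',
--         'mn_redox': 'manganese_metabolism'
--     }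
--
--     detected_mechanisms = []
--     for pathway in pathways.split(';'):
--         pathway_lower = pathway.lower()
--         for keyword, mechanism in pathway_to_mechanism.items():
--             if keyword in pathway_lower:
--                 detected_mechanisms.append(mechanism)
--                 break
--
--     return list(set(detected_mechanisms))  # Return unique mechanisms
-- ===== SOURCE B (Python) =====
-- def assign_mechanism_from_pathway(pathways):
--     """Map pathways to corrosion mechanisms based on pathway keywords"""
--     NITROGEN = ('nitrogen', 'nitrate', 'nitrite', 'denitrification', 'nitrification')
--     MANGANESE = ('manganese', 'mn_redox')
--     segments = [p.lower() for p in pathways.split(';')]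
--     has_nitrogen = any(k in s for s in segments for k in NITROGEN)
--     has_manganese = any(any(k in s for k in MANGANESE) and not any(k in s for k in NITROGEN)
--                         for s in segments)
--     result = []
--     if has_nitrogen:
--         result.append('nitrogen_metabolism')
--     if has_manganese:
--         result.append('manganese_metabolism')
--     return result
-- ===== Notes on version B (the rewrite author's own statement) =====
-- stated objective: alternative
-- what changed: Instead of A's generate-then-dedup (per-segment first-match append with an inner break-loop, then list(set(...))), B characterises the answer by two staged existential passes - has_nitrogen (some segment contains a nitrogen keyword) and has_manganese (some segment contains a manganese keyword and no nitrogen keyword) - and constructs the result list directly from those two flags, with no accumulator and no set.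
import Mathlib
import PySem

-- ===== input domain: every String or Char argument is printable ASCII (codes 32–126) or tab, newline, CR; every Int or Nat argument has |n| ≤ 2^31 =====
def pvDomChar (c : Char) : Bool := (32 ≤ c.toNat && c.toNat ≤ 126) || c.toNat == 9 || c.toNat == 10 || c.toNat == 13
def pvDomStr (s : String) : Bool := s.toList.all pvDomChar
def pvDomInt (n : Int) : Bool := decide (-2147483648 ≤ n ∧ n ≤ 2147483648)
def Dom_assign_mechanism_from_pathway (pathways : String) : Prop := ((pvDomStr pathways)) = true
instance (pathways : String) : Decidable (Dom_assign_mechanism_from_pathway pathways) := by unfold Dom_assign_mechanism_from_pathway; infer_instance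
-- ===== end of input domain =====

-- B replaces A's per-segment first-match-append loop + final list(set(...)) by two staged
-- existential flag passes (has_nitrogen / has_manganese) and builds the result directly from
-- the flags, with no accumulator and no dedup structure (objective: alternative).


-- ===== PORT A =====
-- s.split(';') with a non-empty literal separator: PySem.Chars.splitOn is the sep ≠ "" form
def pvSplitSemi (s : String) : List String :=
  (PySem.Chars.splitOn s.toList [';']).map String.ofList

-- the dict literal pathway_to_mechanism (distinct keys: items in insertion order)
def pvPathwayToMechanism : List (String × String) :=
  [("nitrogen", "nitrogen_metabolism"),
   ("nitrate", "nitrogen_metabolism"),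
   ("nitrite", "nitrogen_metabolism"),
   ("denitrification", "nitrogen_metabolism"),
   ("nitrification", "nitrogen_metabolism"),
   ("manganese", "manganese_metabolism"),
   ("mn_redox", "manganese_metabolism")]

-- the inner 'for keyword, mechanism in ….items(): if keyword in pathway_lower: append; break'
def pvInnerA : List (String × String) → String → List String → List String
  | [], _, acc => acc
  | (keyword, mechanism) :: rest, pathwayLower, acc =>
      if PySem.Str.isIn keyword pathwayLower then acc ++ [mechanism]
      else pvInnerA rest pathwayLower acc

def assign_mechanism_from_pathway (pathways : String) : List String :=
  let detected := (pvSplitSemi pathways).foldl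
    (fun acc pathway => pvInnerA pvPathwayToMechanism (PySem.Str.lower pathway) acc) []
  -- list(set(detected_mechanisms)): PySem.Set models the set; Python's hash iteration order is
  -- not modelled — Pre_ excludes the inputs where more than one mechanism is detected.
  PySem.Set.ofList detected

-- ===== PORT B =====
def pvNitrogenKeywords : List String :=
  ["nitrogen", "nitrate", "nitrite", "denitrification", "nitrification"]
def pvManganeseKeywords : List String := ["manganese", "mn_redox"]

-- any(k in s for k in NITROGEN) / any(k in s for k in MANGANESE)
def pvHitsNitrogen (s : String) : Bool := pvNitrogenKeywords.any (fun k => PySem.Str.isIn k s)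
def pvHitsManganese (s : String) : Bool := pvManganeseKeywords.any (fun k => PySem.Str.isIn k s)

def assign_mechanism_from_pathway_alt (pathways : String) : List String :=
  let segments := (pvSplitSemi pathways).map PySem.Str.lower
  let hasNitrogen := segments.any pvHitsNitrogen
  let hasManganese := segments.any (fun s => pvHitsManganese s && !pvHitsNitrogen s)
  (if hasNitrogen then ["nitrogen_metabolism"] else []) ++
  (if hasManganese then ["manganese_metabolism"] else [])

-- ===== PRECONDITION & SPEC =====
-- Pre_ excludes inputs that trigger BOTH mechanism families: there A returns a two-element list
-- whose order is an accident of Python's set hash-iteration order (it varies with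
-- PYTHONHASHSEED), so no single order is the one to match; B lists nitrogen first.
def Pre_assign_mechanism_from_pathway (pathways : String) : Prop :=
  ¬ ((((pvSplitSemi pathways).map PySem.Str.lower).any pvHitsNitrogen = true)
     ∧ (((pvSplitSemi pathways).map PySem.Str.lower).any
          (fun s => pvHitsManganese s && !pvHitsNitrogen s) = true))
instance (pathways : String) : Decidable (Pre_assign_mechanism_from_pathway pathways) := by
  unfold Pre_assign_mechanism_from_pathway; infer_instance

def pvWitness_assign_mechanism_from_pathway : String := "nitrate reduction;glycolysis"

def Spec_assign_mechanism_from_pathway (pathways : String) (out : List String) : Prop := out = assign_mechanism_from_pathway_alt pathways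
instance (pathways : String) (out : List String) : Decidable (Spec_assign_mechanism_from_pathway pathways out) := by unfold Spec_assign_mechanism_from_pathway; infer_instance

-- ===== CLAIM (what is proved, stated in full; the proofs are below) =====
def Claim_equal_assign_mechanism_from_pathway : Prop := ∀ (pathways : String), Dom_assign_mechanism_from_pathway pathways → Pre_assign_mechanism_from_pathway pathways → Spec_assign_mechanism_from_pathway pathways (assign_mechanism_from_pathway pathways)

-- ===== LEMMAS AND PROOFS =====

-- the mechanism A's inner break-loop selects for a (lowered) segment, as an option
def pvMech (s : String) : Option String :=
  if pvHitsNitrogen s then some "nitrogen_metabolism"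
  else if pvHitsManganese s then some "manganese_metabolism"
  else none

theorem pvInnerA_eq (pl : String) (acc : List String) :
    pvInnerA pvPathwayToMechanism pl acc = acc ++ (pvMech pl).toList := by
  simp only [pvPathwayToMechanism, pvInnerA, pvMech, pvHitsNitrogen, pvHitsManganese,
    pvNitrogenKeywords, pvManganeseKeywords, List.any_cons, List.any_nil]
  split_ifs <;> simp_all

-- A's detected list is the concatenation of pvMech over the lowered segments
theorem detected_eq (l : List String) (acc : List String) :
    l.foldl (fun acc p => pvInnerA pvPathwayToMechanism (PySem.Str.lower p) acc) acc
      = acc ++ (l.map PySem.Str.lower).flatMap (fun s => (pvMech s).toList) := by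
  induction l generalizing acc with
  | nil => simp
  | cons x xs ih =>
      rw [List.foldl_cons, pvInnerA_eq, ih, List.map_cons, List.flatMap_cons, List.append_assoc]

-- Set.ofList of a nonempty constant list is the singleton
theorem ofList_const (v : String) (l : List String) (hne : l ≠ [])
    (hall : ∀ x ∈ l, x = v) : PySem.Set.ofList l = [v] := by
  have key : ∀ (m : List String), (∀ x ∈ m, x = v) →
      List.foldl PySem.Set.add [v] m = [v] := by
    intro m
    induction m with
    | nil => intro _; rfl
    | cons y ys ih =>
        intro h
        have hy := h y (List.mem_cons_self ..)
        rw [List.foldl_cons, hy]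
        have hadd : PySem.Set.add [v] v = [v] := by simp [PySem.Set.add, PySem.Set.contains]
        rw [hadd]
        exact ih (fun x hx => h x (List.mem_cons_of_mem _ hx))
  cases l with
  | nil => exact absurd rfl hne
  | cons x xs =>
      have hx := hall x (List.mem_cons_self ..)
      rw [PySem.Set.ofList_eq_foldl, List.foldl_cons, hx]
      have hadd : PySem.Set.add [] v = [v] := by simp [PySem.Set.add, PySem.Set.contains]
      rw [hadd]
      exact key xs (fun y hy => hall y (List.mem_cons_of_mem _ hy))

theorem ports_agree (pathways : String)
    (hpre : Pre_assign_mechanism_from_pathway pathways) :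
    assign_mechanism_from_pathway pathways = assign_mechanism_from_pathway_alt pathways := by
  unfold assign_mechanism_from_pathway assign_mechanism_from_pathway_alt
  unfold Pre_assign_mechanism_from_pathway at hpre
  rw [detected_eq]
  set M := (pvSplitSemi pathways).map PySem.Str.lower with hM
  simp only [List.nil_append]
  set hasN := M.any pvHitsNitrogen with hN
  set hasM := M.any (fun s => pvHitsManganese s && !pvHitsNitrogen s) with hMn
  cases hcN : hasN with
  | false =>
      -- no segment hits nitrogen: every pvMech is none or manganese
      have hnone : ∀ s ∈ M, pvHitsNitrogen s = false := by
        intro s hs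
        by_contra h
        have : hasN = true := by
          rw [hN]; exact List.any_eq_true.2 ⟨s, hs, by simpa using h⟩
        simp [hcN] at this
      cases hcM : hasM with
      | false =>
          -- nothing detected at all
          have hnil : M.flatMap (fun s => (pvMech s).toList) = [] := by
            apply List.flatMap_eq_nil_iff.2
            intro s hs
            have h1 := hnone s hs
            have h2 : (pvHitsManganese s && !pvHitsNitrogen s) = false := by
              by_contra h
              have : hasM = true := by
                rw [hMn]; exact List.any_eq_true.2 ⟨s, hs, by simpa using h⟩
              simp [hcM] at this
            simp [h1] at h2
            simp [pvMech, h1, h2]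
          rw [hnil]
          simp [PySem.Set.ofList, hcN, hcM]
      | true =>
          -- only manganese detected
          obtain ⟨s, hs, hsp⟩ := List.any_eq_true.1 (hMn ▸ hcM)
          have hall : ∀ x ∈ M.flatMap (fun s => (pvMech s).toList),
              x = "manganese_metabolism" := by
            intro x hx
            obtain ⟨t, ht, hxt⟩ := List.mem_flatMap.1 hx
            have h1 := hnone t ht
            simp only [pvMech, h1, if_false, Bool.false_eq_true] at hxt
            split at hxt <;> simp_all
          have hne : M.flatMap (fun s => (pvMech s).toList) ≠ [] := by
            intro hnil
            have h1 := hnone s hs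
            have hmem : "manganese_metabolism" ∈ M.flatMap (fun s => (pvMech s).toList) := by
              apply List.mem_flatMap.2
              refine ⟨s, hs, ?_⟩
              have h2 : pvHitsManganese s = true := by
                simp [h1] at hsp; exact hsp
              simp [pvMech, h1, h2]
            rw [hnil] at hmem
            exact absurd hmem (List.not_mem_nil)
          rw [ofList_const _ _ hne hall]
          simp [hcN, hcM]
  | true =>
      -- some segment hits nitrogen; Pre_ forbids hasM
      have hcM : hasM = false := by
        cases h : hasM with
        | false => rfl
        | true => exact absurd ⟨hN ▸ hcN, hMn ▸ h⟩ hpre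
      obtain ⟨s, hs, hsp⟩ := List.any_eq_true.1 (hN ▸ hcN)
      have hall : ∀ x ∈ M.flatMap (fun s => (pvMech s).toList),
          x = "nitrogen_metabolism" := by
        intro x hx
        obtain ⟨t, ht, hxt⟩ := List.mem_flatMap.1 hx
        by_cases h1 : pvHitsNitrogen t = true
        · simp [pvMech, h1] at hxt; exact hxt
        · have h1' : pvHitsNitrogen t = false := by simpa using h1
          by_cases h2 : pvHitsManganese t = true
          · exfalso
            have : hasM = true := by
              rw [hMn]
              exact List.any_eq_true.2 ⟨t, ht, by simp [h1', h2]⟩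
            simp [hcM] at this
          · simp [pvMech, h1', (by simpa using h2 : pvHitsManganese t = false)] at hxt
      have hne : M.flatMap (fun s => (pvMech s).toList) ≠ [] := by
        intro hnil
        have hmem : "nitrogen_metabolism" ∈ M.flatMap (fun s => (pvMech s).toList) := by
          apply List.mem_flatMap.2
          exact ⟨s, hs, by simp [pvMech, hsp]⟩
        rw [hnil] at hmem
        exact absurd hmem (List.not_mem_nil)
      rw [ofList_const _ _ hne hall]
      simp [hcN, hcM]

-- ===== VERDICT (by name: the statement is the Claim_ definition above) =====
theorem assign_mechanism_from_pathway_spec : Claim_equal_assign_mechanism_from_pathway := by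
  intro pathways _ hpre
  unfold Spec_assign_mechanism_from_pathway
  exact ports_agree pathways hpre
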